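-- pv_equiv track=rewrite | github.com/AmirAlavi/scrna_nn | data_prep.py | filter_cell_to_ontology_terms
-- ===== SOURCE A (Python) =====
-- def filter_cell_to_ontology_terms(mappings, term_counts_d):
--     terms_to_ignore = set()
--     for term, count in term_counts_d.items():
--         if count < 75 or 'NCBITaxon' in term or 'PR:' in term or 'PATO:' in term or 'GO:' in term or 'CLO:' in term:
--             terms_to_ignore.add(term)
--     # Terms that just don't seem that useful, or had too much overlap with another term that was more useful
--     terms_to_ignore.add('UBERON:0000006 islet of Langerhans')
--     terms_to_ignore.add('CL:0000639 basophil cell of pars distalis of adenohypophysis')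
--     terms_to_ignore.add('CL:0000557 granulocyte monocyte progenitor cell')
--     terms_to_ignore.add('UBERON:0001068 skin of back')
--     terms_to_ignore.add('CL:0000034 stem cell')
--     terms_to_ignore.add('CL:0000048 multi fate stem cell')
--     terms_to_ignore.add('UBERON:0000178 blood')
--     terms_to_ignore.add('UBERON:0001135 smooth muscle tissue')
--     terms_to_ignore.add('UBERON:0001630 muscle organ')
--     terms_to_ignore.add('CL:0000000 cell')
--     terms_to_ignore.add('CL:0000080 circulating cell')
--
--     # Clean the mappings
--     for cell in mappings.keys():
--         terms = mappings[cell]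
--         mappings[cell] = [term for term in terms if term not in terms_to_ignore]
--     return mappings
-- ===== SOURCE B (Python) =====
-- _CONSTANT_IGNORES = frozenset([
--     'UBERON:0000006 islet of Langerhans',
--     'CL:0000639 basophil cell of pars distalis of adenohypophysis',
--     'CL:0000557 granulocyte monocyte progenitor cell',
--     'UBERON:0001068 skin of back',
--     'CL:0000034 stem cell',
--     'CL:0000048 multi fate stem cell',
--     'UBERON:0000178 blood',
--     'UBERON:0001135 smooth muscle tissue',
--     'UBERON:0001630 muscle organ',
--     'CL:0000000 cell',
--     'CL:0000080 circulating cell',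
-- ])
--
-- _BAD_SUBSTRINGS = ('NCBITaxon', 'PR:', 'PATO:', 'GO:', 'CLO:')
--
--
-- def _drop(term, term_counts_d):
--     if term in _CONSTANT_IGNORES:
--         return True
--     count = term_counts_d.get(term)
--     if count is None:
--         return False
--     return count < 75 or any(sub in term for sub in _BAD_SUBSTRINGS)
--
--
-- def filter_cell_to_ontology_terms(mappings, term_counts_d):
--     for cell in mappings:
--         mappings[cell] = [t for t in mappings[cell] if not _drop(t, term_counts_d)]
--     return mappings
-- ===== Notes on version B (the rewrite author's own statement) =====
-- stated objective: simpler
-- what changed: B drops A's precomputed terms_to_ignore set (a pass over term_counts_d plus 11 adds) and instead filters each cell's term list in a single pass with an inline predicate: constant-set membership, or a term_counts_d.get lookup gated on the key being present combined with the count/substring rules.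
import Mathlib
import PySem

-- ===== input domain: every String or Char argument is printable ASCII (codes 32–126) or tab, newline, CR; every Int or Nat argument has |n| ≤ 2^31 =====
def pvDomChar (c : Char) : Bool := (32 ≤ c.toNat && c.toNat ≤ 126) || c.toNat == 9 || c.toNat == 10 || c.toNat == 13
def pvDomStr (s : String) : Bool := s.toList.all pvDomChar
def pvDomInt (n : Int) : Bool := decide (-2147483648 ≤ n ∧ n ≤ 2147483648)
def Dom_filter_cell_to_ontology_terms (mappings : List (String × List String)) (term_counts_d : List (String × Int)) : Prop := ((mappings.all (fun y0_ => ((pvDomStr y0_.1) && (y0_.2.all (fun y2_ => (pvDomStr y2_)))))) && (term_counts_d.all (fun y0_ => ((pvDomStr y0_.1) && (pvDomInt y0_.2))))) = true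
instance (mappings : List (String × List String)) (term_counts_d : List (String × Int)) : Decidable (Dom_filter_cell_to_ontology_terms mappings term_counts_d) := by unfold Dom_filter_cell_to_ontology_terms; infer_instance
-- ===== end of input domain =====

-- B replaces A's precomputed ignore-set (a pass over term_counts_d plus 11 adds) by a single
-- filtering pass with an inline predicate; same return value, and both rebind mappings[cell]
-- in place in Python (the equivalence proved here is about the return value).

-- ===== PORT A =====
def fcotA_pred (term : String) (count : Int) : Bool :=
  decide (count < 75) || PySem.Str.isIn "NCBITaxon" term || PySem.Str.isIn "PR:" term ||
    PySem.Str.isIn "PATO:" term || PySem.Str.isIn "GO:" term || PySem.Str.isIn "CLO:" term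

def fcotA_ignore (term_counts_d : List (String × Int)) : PySem.Set String :=
  let s0 : PySem.Set String :=
    term_counts_d.foldl
      (fun s p => if fcotA_pred p.1 p.2 then PySem.Set.add s p.1 else s) PySem.Set.empty
  let s1 := PySem.Set.add s0 "UBERON:0000006 islet of Langerhans"
  let s2 := PySem.Set.add s1 "CL:0000639 basophil cell of pars distalis of adenohypophysis"
  let s3 := PySem.Set.add s2 "CL:0000557 granulocyte monocyte progenitor cell"
  let s4 := PySem.Set.add s3 "UBERON:0001068 skin of back"
  let s5 := PySem.Set.add s4 "CL:0000034 stem cell"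
  let s6 := PySem.Set.add s5 "CL:0000048 multi fate stem cell"
  let s7 := PySem.Set.add s6 "UBERON:0000178 blood"
  let s8 := PySem.Set.add s7 "UBERON:0001135 smooth muscle tissue"
  let s9 := PySem.Set.add s8 "UBERON:0001630 muscle organ"
  let s10 := PySem.Set.add s9 "CL:0000000 cell"
  PySem.Set.add s10 "CL:0000080 circulating cell"

def filter_cell_to_ontology_terms (mappings : List (String × List String)) (term_counts_d : List (String × Int)) : List (String × List String) :=
  let ignore := fcotA_ignore term_counts_d
  mappings.map (fun cell => (cell.1, cell.2.filter (fun term => !(PySem.Set.contains ignore term))))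

-- ===== PORT B =====
def fcotB_consts : List String :=
  ["UBERON:0000006 islet of Langerhans",
   "CL:0000639 basophil cell of pars distalis of adenohypophysis",
   "CL:0000557 granulocyte monocyte progenitor cell",
   "UBERON:0001068 skin of back",
   "CL:0000034 stem cell",
   "CL:0000048 multi fate stem cell",
   "UBERON:0000178 blood",
   "UBERON:0001135 smooth muscle tissue",
   "UBERON:0001630 muscle organ",
   "CL:0000000 cell",
   "CL:0000080 circulating cell"]

def fcotB_subs : List String := ["NCBITaxon", "PR:", "PATO:", "GO:", "CLO:"]

def fcotB_drop (term_counts_d : List (String × Int)) (term : String) : Bool :=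
  if fcotB_consts.contains term then true
  else
    match (PySem.Dict.mk term_counts_d).get? term with
    | none => false
    | some count => decide (count < 75) || fcotB_subs.any (fun sub => PySem.Str.isIn sub term)

def filter_cell_to_ontology_terms_alt (mappings : List (String × List String)) (term_counts_d : List (String × Int)) : List (String × List String) :=
  mappings.map (fun cell => (cell.1, cell.2.filter (fun t => !fcotB_drop term_counts_d t)))

-- ===== PRECONDITION & SPEC =====
-- Pre_ excludes association lists with duplicate keys in term_counts_d: such a list does not
-- represent any Python dict (A's parameter is a dict, whose keys are unique), so A's behaviour
-- there is not defined; the two ports may disagree only on those unrepresentable inputs.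
def Pre_filter_cell_to_ontology_terms (mappings : List (String × List String)) (term_counts_d : List (String × Int)) : Prop :=
  (term_counts_d.map Prod.fst).Nodup
instance (mappings : List (String × List String)) (term_counts_d : List (String × Int)) : Decidable (Pre_filter_cell_to_ontology_terms mappings term_counts_d) := by unfold Pre_filter_cell_to_ontology_terms; infer_instance

def pvWitness_filter_cell_to_ontology_terms : (List (String × List String)) × (List (String × Int)) :=
  ([("cell1", ["CL:0000000 cell", "CL:1234 good term", "PATO:1 shape"])],
   [("CL:1234 good term", 100), ("rare term", 2)])

def Spec_filter_cell_to_ontology_terms (mappings : List (String × List String)) (term_counts_d : List (String × Int)) (out : List (String × List String)) : Prop := out = filter_cell_to_ontology_terms_alt mappings term_counts_d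
instance (mappings : List (String × List String)) (term_counts_d : List (String × Int)) (out : List (String × List String)) : Decidable (Spec_filter_cell_to_ontology_terms mappings term_counts_d out) := by unfold Spec_filter_cell_to_ontology_terms; infer_instance

-- ===== CLAIM (what is proved, stated in full; the proofs are below) =====
def Claim_equal_filter_cell_to_ontology_terms : Prop := ∀ (mappings : List (String × List String)) (term_counts_d : List (String × Int)), Dom_filter_cell_to_ontology_terms mappings term_counts_d → Pre_filter_cell_to_ontology_terms mappings term_counts_d → Spec_filter_cell_to_ontology_terms mappings term_counts_d (filter_cell_to_ontology_terms mappings term_counts_d)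

-- ===== LEMMAS AND PROOFS =====

-- Membership in A's first fold: t got added iff some entry (t, c) satisfies the predicate.
lemma fcot_mem_foldl (l : List (String × Int)) (s : PySem.Set String) (t : String) :
    t ∈ l.foldl (fun s p => if fcotA_pred p.1 p.2 then PySem.Set.add s p.1 else s) s ↔
      t ∈ s ∨ ∃ c, (t, c) ∈ l ∧ fcotA_pred t c = true := by
  induction l generalizing s with
  | nil => simp
  | cons hd tl ih =>
    rw [List.foldl_cons]
    by_cases hp : fcotA_pred hd.1 hd.2 = true
    · rw [if_pos hp, ih, PySem.Set.mem_add]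
      constructor
      · rintro (⟨h | rfl⟩ | ⟨c, hc, hpc⟩)
        · exact Or.inl h
        · exact Or.inr ⟨hd.2, by simp, hp⟩
        · exact Or.inr ⟨c, List.mem_cons_of_mem _ hc, hpc⟩
      · rintro (h | ⟨c, hc, hpc⟩)
        · exact Or.inl (Or.inl h)
        · rcases List.mem_cons.mp hc with heq | hm
          · exact Or.inl (Or.inr (congrArg Prod.fst heq))
          · exact Or.inr ⟨c, hm, hpc⟩
    · rw [if_neg hp, ih]
      constructor
      · rintro (h | ⟨c, hc, hpc⟩)
        · exact Or.inl h
        · exact Or.inr ⟨c, List.mem_cons_of_mem _ hc, hpc⟩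
      · rintro (h | ⟨c, hc, hpc⟩)
        · exact Or.inl h
        · rcases List.mem_cons.mp hc with heq | hm
          · exact absurd (heq ▸ hpc) hp
          · exact Or.inr ⟨c, hm, hpc⟩

-- First-match dict lookup agrees with list membership when the keys are unique.
lemma fcot_get?_eq_some (l : List (String × Int)) (h : (l.map Prod.fst).Nodup) (t : String) (c : Int) :
    (PySem.Dict.mk l).get? t = some c ↔ (t, c) ∈ l := by
  induction l with
  | nil => simp [PySem.Dict.get?]
  | cons hd tl ih =>
    obtain ⟨k, v⟩ := hd
    simp only [List.map_cons, List.nodup_cons] at h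
    rw [PySem.Dict.get?_mk_cons]
    by_cases hk : k = t
    · subst hk
      rw [if_pos (by simp)]
      constructor
      · intro hv
        exact List.mem_cons.mpr (Or.inl (by injection hv with hv; rw [hv]))
      · intro hm
        rcases List.mem_cons.mp hm with heq | hm
        · injection heq with _ h2; rw [h2]
        · exact absurd (List.mem_map.mpr ⟨(k, c), hm, rfl⟩) h.1
    · rw [if_neg (by simpa using hk), ih h.2]
      constructor
      · exact List.mem_cons_of_mem _
      · intro hm
        rcases List.mem_cons.mp hm with heq | hm
        · exact absurd (congrArg Prod.fst heq).symm hk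
        · exact hm

lemma fcot_get?_eq_none (l : List (String × Int)) (t : String) :
    (PySem.Dict.mk l).get? t = none ↔ t ∉ l.map Prod.fst := by
  induction l with
  | nil => simp [PySem.Dict.get?]
  | cons hd tl ih =>
    rw [PySem.Dict.get?_mk_cons]
    by_cases hk : hd.1 = t
    · simp [hk]
    · rw [if_neg (by simpa using hk)]
      simp [ih, Ne.symm hk]

-- What A's ignore set contains.
lemma fcot_mem_ignore (term_counts_d : List (String × Int)) (t : String) :
    t ∈ fcotA_ignore term_counts_d ↔
      t ∈ fcotB_consts ∨ ∃ c, (t, c) ∈ term_counts_d ∧ fcotA_pred t c = true := by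
  unfold fcotA_ignore
  simp only [PySem.Set.mem_add, fcot_mem_foldl, PySem.Set.empty, List.not_mem_nil, false_or,
    fcotB_consts, List.mem_cons, or_false]
  constructor
  · rintro (((((((((((⟨c, hc, hpc⟩ | rfl) | rfl) | rfl) | rfl) | rfl) | rfl) | rfl) | rfl) | rfl) | rfl) | rfl)
    · exact Or.inr ⟨c, hc, hpc⟩
    all_goals tauto
  · rintro (h | ⟨c, hc, hpc⟩)
    · rcases h with rfl | rfl | rfl | rfl | rfl | rfl | rfl | rfl | rfl | rfl | rfl <;> tauto
    · exact Or.inl (Or.inl (Or.inl (Or.inl (Or.inl (Or.inl (Or.inl (Or.inl (Or.inl (Or.inl (Or.inl ⟨c, hc, hpc⟩))))))))))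

-- What B's inline predicate drops (for unique keys).
lemma fcot_drop_iff (term_counts_d : List (String × Int))
    (h : (term_counts_d.map Prod.fst).Nodup) (t : String) :
    fcotB_drop term_counts_d t = true ↔
      t ∈ fcotB_consts ∨ ∃ c, (t, c) ∈ term_counts_d ∧ fcotA_pred t c = true := by
  unfold fcotB_drop
  by_cases hconst : t ∈ fcotB_consts
  · rw [if_pos (by simpa using hconst)]
    simp [hconst]
  · rw [if_neg (by simpa using hconst)]
    cases hget : (PySem.Dict.mk term_counts_d).get? t with
    | none =>
      simp only [Bool.false_eq_true, false_iff]
      rintro (hc | ⟨c, hc, _⟩)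
      · exact hconst hc
      · exact (fcot_get?_eq_none _ _).mp hget (List.mem_map.mpr ⟨(t, c), hc, rfl⟩)
    | some c =>
      have hmem : (t, c) ∈ term_counts_d := (fcot_get?_eq_some _ h _ _).mp hget
      constructor
      · intro hb
        refine Or.inr ⟨c, hmem, ?_⟩
        revert hb
        unfold fcotA_pred fcotB_subs
        simp only [List.any_cons, List.any_nil, Bool.or_eq_true, Bool.or_false]
        tauto
      · rintro (hc | ⟨c', hc', hpc⟩)
        · exact absurd hc hconst
        · have : c' = c := by
            have := (fcot_get?_eq_some _ h t c').mpr hc'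
            rw [hget] at this; injection this with h'; exact h'.symm
          subst this
          revert hpc
          unfold fcotA_pred fcotB_subs
          simp only [List.any_cons, List.any_nil, Bool.or_eq_true, Bool.or_false]
          tauto

-- The pointwise heart: A's set membership test equals B's inline predicate.
lemma fcot_pointwise (term_counts_d : List (String × Int))
    (h : (term_counts_d.map Prod.fst).Nodup) (t : String) :
    PySem.Set.contains (fcotA_ignore term_counts_d) t = fcotB_drop term_counts_d t := by
  rw [Bool.eq_iff_iff, PySem.Set.contains_iff, fcot_mem_ignore, fcot_drop_iff term_counts_d h t]

-- ===== VERDICT (by name: the statement is the Claim_ definition above) =====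
theorem filter_cell_to_ontology_terms_spec : Claim_equal_filter_cell_to_ontology_terms := by
  intro mappings term_counts_d _ hpre
  unfold Spec_filter_cell_to_ontology_terms filter_cell_to_ontology_terms filter_cell_to_ontology_terms_alt
  refine List.map_congr_left (fun cell _ => ?_)
  refine congrArg _ (List.filter_congr (fun t _ => ?_))
  rw [fcot_pointwise term_counts_d hpre t]
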